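-- pv_equiv track=rewrite | github.com/jasminenoack-ai-agents/project-euler-python | ai-solutions/problem004a.py | solve
-- ===== SOURCE A (Python) =====
-- def _is_palindrome_in_base(number: int, base: int) -> bool:
--     """Return ``True`` if ``number`` is a palindrome when written in ``base``."""
--     if base < 2:
--         raise ValueError("base must be >= 2")
--     if number < 0:
--         return False
--     digits = []
--     n = number
--     while n:
--         digits.append(n % base)
--         n //= base
--     if not digits:
--         digits.append(0)
--     return digits == digits[::-1]
--
-- def solve(digits: int = 3, base: int = 7) -> int:
--     """Return the largest product of two ``digits``-digit numbers that is a
--     palindrome in ``base``."""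
--     if digits < 1:
--         raise ValueError("digits must be >= 1")
--     if base < 2:
--         raise ValueError("base must be >= 2")
--
--     lower = 10 ** (digits - 1)
--     upper = 10 ** digits - 1
--     best = 0
--
--     for i in range(upper, lower - 1, -1):
--         for j in range(i, lower - 1, -1):
--             product = i * j
--             if product <= best:
--                 break
--             if _is_palindrome_in_base(product, base):
--                 best = product
--                 break
--     return best
-- ===== SOURCE B (Python) =====
-- def _reversed_in_base(number: int, base: int) -> int:
--     """Value of ``number``'s base-``base`` digits read in reverse order."""
--     rev = 0
--     n = number
--     while n > 0:
--         rev = rev * base + n % base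
--         n //= base
--     return rev
--
--
-- def solve(digits: int = 3, base: int = 7) -> int:
--     """Return the largest product of two ``digits``-digit numbers that is a
--     palindrome in ``base``.
--
--     Generates base-``base`` palindromes in descending order from their
--     high-half digits and returns the first one in the product range that
--     factors into two ``digits``-digit numbers (larger factor tried downward
--     from ``upper`` while its square still covers the product)."""
--     if digits < 1:
--         raise ValueError("digits must be >= 1")
--     if base < 2:
--         raise ValueError("base must be >= 2")
--
--     lower = 10 ** (digits - 1)
--     upper = 10 ** digits - 1
--     lo = lower * lower
--     hi = upper * upper
--
--     # number of base-`base` digits of hi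
--     k = 0
--     t = hi
--     while t > 0:
--         k += 1
--         t //= base
--
--     while k >= 1:
--         m = k // 2               # length of the mirrored low half
--         h = base ** (k - m) - 1  # high half, scanned downward
--         if h > hi // base ** m:  # skip halves whose palindromes all exceed hi
--             h = hi // base ** m
--         while h >= base ** (k - m - 1):
--             p = h * base ** m + _reversed_in_base(h // base ** (k - 2 * m), base)
--             if p < lo:
--                 break
--             if p <= hi:
--                 a = upper
--                 while a * a >= p:
--                     if p % a == 0 and p // a >= lower:
--                         return p
--                     a -= 1
--             h -= 1
--         k -= 1
--     return 0
-- ===== Notes on version B (the rewrite author's own statement) =====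
-- stated objective: alternative
-- what changed: Replaces A's pruned double loop over all factor pairs (i,j) by generating base-b palindromes directly in descending order from their high-half digits and returning the first one in [lower^2, upper^2] that has a d-digit divisor pair (divisor scanned downward from upper while its square covers the product).
import Mathlib
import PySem

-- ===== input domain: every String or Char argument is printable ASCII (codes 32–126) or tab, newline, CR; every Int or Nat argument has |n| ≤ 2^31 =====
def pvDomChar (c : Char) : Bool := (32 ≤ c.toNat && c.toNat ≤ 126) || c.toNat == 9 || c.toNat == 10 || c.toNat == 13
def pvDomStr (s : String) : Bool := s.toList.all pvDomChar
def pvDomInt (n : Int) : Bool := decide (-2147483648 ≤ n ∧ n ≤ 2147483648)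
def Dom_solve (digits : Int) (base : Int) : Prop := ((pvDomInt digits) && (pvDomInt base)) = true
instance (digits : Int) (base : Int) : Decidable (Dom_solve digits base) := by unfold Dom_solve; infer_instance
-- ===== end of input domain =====

-- B replaces A's pruned double loop over factor pairs by generating base-b palindromes in
-- descending order from their high-half digits and returning the first factorable one
-- (objective: faster enumeration of candidates).

-- ===== PORT A =====
-- `while n: digits.append(n % base); n //= base` — the `2 ≤ base` part of the guard is only
-- for termination; every call site has base ≥ 2.
def pvDigitsOf (base : Int) (n : Int) : List Int :=
  if h : 0 < n ∧ 2 ≤ base then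
    PySem.Int.mod n base :: pvDigitsOf base (PySem.Int.floordiv n base)
  else []
termination_by n.toNat
decreasing_by
  rw [PySem.Int.floordiv_eq_ediv_of_pos (by omega)]
  have h0 : 0 ≤ n % base := Int.emod_nonneg n (by omega)
  have h1 : n % base < base := Int.emod_lt_of_pos n (by omega)
  have h2 : base * (n / base) + n % base = n := Int.ediv_add_emod n base
  have h3 : 0 ≤ n / base := Int.ediv_nonneg (by omega) (by omega)
  have h4 : n / base < n := by nlinarith
  omega

-- _is_palindrome_in_base; the `base < 2` ValueError branch is outside Pre_solve.
def pvIsPalA (number : Int) (base : Int) : Bool :=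
  if number < 0 then false
  else
    let ds := pvDigitsOf base number
    let ds := if ds = [] then [0] else ds
    ds == ds.reverse

-- inner `for j in range(i, lower - 1, -1)` (lazy range, scanned as a counter) with its two breaks
def pvInnerA (base L i best j : Int) : Int :=
  if j ≤ L - 1 then best
  else if i * j ≤ best then best
  else if pvIsPalA (i * j) base then i * j
  else pvInnerA base L i best (j - 1)
termination_by (j - (L - 1)).toNat
decreasing_by omega

-- outer `for i in range(upper, lower - 1, -1)`
def pvOuterA (base L best i : Int) : Int :=
  if i ≤ L - 1 then best
  else pvOuterA base L (pvInnerA base L i best i) (i - 1)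
termination_by (i - (L - 1)).toNat
decreasing_by omega

-- the two ValueError branches (digits < 1, base < 2) are excluded by Pre_solve
def solve (digits : Int) (base : Int) : Int :=
  if digits < 1 then 0
  else if base < 2 then 0
  else
    let lower : Int := 10 ^ (digits - 1).toNat
    let upper : Int := 10 ^ digits.toNat - 1
    pvOuterA base lower 0 upper

-- ===== PORT B =====
-- _reversed_in_base; the `2 ≤ base` part of the guard is only for termination
-- (every call site has base ≥ 2).
def pvRevIn (base : Int) (acc n : Int) : Int :=
  if h : 0 < n ∧ 2 ≤ base then
    pvRevIn base (acc * base + PySem.Int.mod n base) (PySem.Int.floordiv n base)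
  else acc
termination_by n.toNat
decreasing_by
  rw [PySem.Int.floordiv_eq_ediv_of_pos (by omega)]
  have h0 : 0 ≤ n % base := Int.emod_nonneg n (by omega)
  have h1 : n % base < base := Int.emod_lt_of_pos n (by omega)
  have h2 : base * (n / base) + n % base = n := Int.ediv_add_emod n base
  have h3 : 0 ≤ n / base := Int.ediv_nonneg (by omega) (by omega)
  have h4 : n / base < n := by nlinarith
  omega

-- `k = 0; t = hi` / `while t > 0: k += 1; t //= base` (2 ≤ base part of the guard for termination)
def pvNumDigits (base : Int) (t : Int) : Int :=
  if h : 0 < t ∧ 2 ≤ base then pvNumDigits base (PySem.Int.floordiv t base) + 1 else 0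
termination_by t.toNat
decreasing_by
  rw [PySem.Int.floordiv_eq_ediv_of_pos (by omega)]
  have h0 : 0 ≤ t % base := Int.emod_nonneg t (by omega)
  have h1 : t % base < base := Int.emod_lt_of_pos t (by omega)
  have h2 : base * (t / base) + t % base = t := Int.ediv_add_emod t base
  have h3 : 0 ≤ t / base := Int.ediv_nonneg (by omega) (by omega)
  have h4 : t / base < t := by nlinarith
  omega

-- `a = upper` / `while a * a >= p: if p % a == 0 and p // a >= lower: return p; a -= 1`
-- (the `0 < a` part of the guard is only for termination; unreachable from a = upper ≥ 1
-- with p ≥ 1, since the scan stops before a reaches 0)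
def pvFactB (L p a : Int) : Bool :=
  if h : 0 < a ∧ p ≤ a * a then
    if PySem.Int.mod p a == 0 && decide (L ≤ PySem.Int.floordiv p a) then true
    else pvFactB L p (a - 1)
  else false
termination_by a.toNat
decreasing_by omega

-- `while h >= base ** (k - m - 1): p = ...; break/continue/return` (0 = fell through, no
-- hit; the candidate expression `p` is written out at each use)
def pvInnerB (base L U lo hi k m hmin h : Int) : Int :=
  if h < hmin then 0
  else if h * base ^ m.toNat +
      pvRevIn base 0 (PySem.Int.floordiv h (base ^ (k - 2 * m).toNat)) < lo then 0
  else if h * base ^ m.toNat +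
      pvRevIn base 0 (PySem.Int.floordiv h (base ^ (k - 2 * m).toNat)) ≤ hi ∧
      pvFactB L (h * base ^ m.toNat +
        pvRevIn base 0 (PySem.Int.floordiv h (base ^ (k - 2 * m).toNat))) U = true then
    h * base ^ m.toNat + pvRevIn base 0 (PySem.Int.floordiv h (base ^ (k - 2 * m).toNat))
  else pvInnerB base L U lo hi k m hmin (h - 1)
termination_by (h - hmin + 1).toNat
decreasing_by omega

-- `h = base ** (k - m) - 1`, capped so that palindromes all exceeding hi are skipped
def pvOuterH0 (base hi k m : Int) : Int :=
  if base ^ (k - m).toNat - 1 > PySem.Int.floordiv hi (base ^ m.toNat)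
  then PySem.Int.floordiv hi (base ^ m.toNat)
  else base ^ (k - m).toNat - 1

-- one pass of the `while k >= 1` body: the inner scan for digit count k
def pvOuterStep (base L U lo hi k : Int) : Int :=
  pvInnerB base L U lo hi k (PySem.Int.floordiv k 2)
    (base ^ (k - PySem.Int.floordiv k 2 - 1).toNat)
    (pvOuterH0 base hi k (PySem.Int.floordiv k 2))

-- `while k >= 1: ...; k -= 1` (0 from the inner loop = no k-digit hit, keep going)
def pvOuterB (base L U lo hi k : Int) : Int :=
  if k < 1 then 0
  else if pvOuterStep base L U lo hi k = 0 then pvOuterB base L U lo hi (k - 1)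
  else pvOuterStep base L U lo hi k
termination_by k.toNat
decreasing_by omega

-- the two ValueError branches (digits < 1, base < 2) are excluded by Pre_solve
def solve_alt (digits : Int) (base : Int) : Int :=
  if digits < 1 then 0
  else if base < 2 then 0
  else
    let lower : Int := 10 ^ (digits - 1).toNat
    let upper : Int := 10 ^ digits.toNat - 1
    pvOuterB base lower upper (lower * lower) (upper * upper) (pvNumDigits base (upper * upper))

-- ===== PRECONDITION & SPEC =====
-- A raises ValueError when digits < 1 or base < 2; exactly those inputs are excluded.
def Pre_solve (digits : Int) (base : Int) : Prop := 1 ≤ digits ∧ 2 ≤ base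
instance (digits : Int) (base : Int) : Decidable (Pre_solve digits base) := by
  unfold Pre_solve; infer_instance

def pvWitness_solve : Int × Int := (2, 7)

def Spec_solve (digits : Int) (base : Int) (out : Int) : Prop := out = solve_alt digits base
instance (digits : Int) (base : Int) (out : Int) : Decidable (Spec_solve digits base out) := by
  unfold Spec_solve; infer_instance

-- ===== CLAIM (what is proved, stated in full; the proofs are below) =====
def Claim_equal_solve : Prop := ∀ (digits : Int) (base : Int), Dom_solve digits base → Pre_solve digits base → Spec_solve digits base (solve digits base)

-- ===== LEMMAS AND PROOFS =====

-- p is a base-`base` palindrome and a product of two numbers in [L, U] (j ≤ i)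
def pvP (base L U p : Int) : Prop :=
  pvIsPalA p base = true ∧ ∃ i j, L ≤ j ∧ j ≤ i ∧ i ≤ U ∧ p = i * j

-- r is the maximum of {p | pvP p} ∪ {0}
def pvGoodUB (base L U r : Int) : Prop :=
  0 ≤ r ∧ (r = 0 ∨ pvP base L U r) ∧ ∀ p, pvP base L U p → p ≤ r

lemma pvGoodUB_unique {base L U r1 r2 : Int}
    (h1 : pvGoodUB base L U r1) (h2 : pvGoodUB base L U r2) : r1 = r2 := by
  obtain ⟨h10, h1P, h1U⟩ := h1
  obtain ⟨h20, h2P, h2U⟩ := h2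
  have a : r1 ≤ r2 := by
    rcases h1P with h | h
    · omega
    · exact h2U _ h
  have b : r2 ≤ r1 := by
    rcases h2P with h | h
    · omega
    · exact h1U _ h
  omega

lemma pvP_bounds {base L U p : Int} (hL : 1 ≤ L) (h : pvP base L U p) :
    L * L ≤ p ∧ p ≤ U * U := by
  obtain ⟨-, i, j, hj, hji, hiU, rfl⟩ := h
  constructor <;> nlinarith

-- ---------- A side ----------

lemma pvInnerA_spec (base L i : Int) (hi : 0 ≤ i)
    (n : ℕ) (t best : Int) (ht : t - (L - 1) ≤ n) (hbest : 0 ≤ best) :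
    (pvInnerA base L i best t = best ∨
      (pvIsPalA (pvInnerA base L i best t) base = true ∧
        ∃ j, L ≤ j ∧ j ≤ t ∧ pvInnerA base L i best t = i * j)) ∧
    best ≤ pvInnerA base L i best t ∧
    ∀ j, L ≤ j → j ≤ t → pvIsPalA (i * j) base = true →
      i * j ≤ pvInnerA base L i best t := by
  induction n generalizing t with
  | zero =>
    rw [pvInnerA, if_pos (by omega : t ≤ L - 1)]
    exact ⟨Or.inl rfl, le_rfl, fun j hj1 hj2 _ => by omega⟩
  | succ n ihn =>
    by_cases hcase : t ≤ L - 1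
    · rw [pvInnerA, if_pos hcase]
      exact ⟨Or.inl rfl, le_rfl, fun j hj1 hj2 _ => by omega⟩
    · rw [pvInnerA, if_neg hcase]
      split_ifs with h1 h2
      · refine ⟨Or.inl rfl, le_rfl, fun j hj1 hj2 _ => ?_⟩
        have : i * j ≤ i * t := mul_le_mul_of_nonneg_left hj2 hi
        omega
      · refine ⟨Or.inr ⟨h2, t, by omega, le_rfl, rfl⟩, by omega, fun j hj1 hj2 _ => ?_⟩
        exact mul_le_mul_of_nonneg_left hj2 hi
      · obtain ⟨ih1, ih2, ih3⟩ := ihn (t - 1) (by omega)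
        refine ⟨?_, ih2, fun j hj1 hj2 hpal => ?_⟩
        · rcases ih1 with h | ⟨hp, j, hj1, hj2, hj3⟩
          · exact Or.inl h
          · exact Or.inr ⟨hp, j, hj1, by omega, hj3⟩
        · rcases eq_or_lt_of_le hj2 with rfl | hlt
          · exact absurd hpal (by simpa using h2)
          · exact ih3 j hj1 (by omega) hpal

lemma pvOuterA_spec (base L U : Int) (hL : 1 ≤ L)
    (n : ℕ) (s best : Int) (ht : s - (L - 1) ≤ n) (hsU : s ≤ U) (hb0 : 0 ≤ best)
    (hbP : best = 0 ∨ pvP base L U best)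
    (hbU : ∀ i j, L ≤ j → j ≤ i → i ≤ U → s < i → pvIsPalA (i * j) base = true →
      i * j ≤ best) :
    pvGoodUB base L U (pvOuterA base L best s) := by
  induction n generalizing s best with
  | zero =>
    rw [pvOuterA, if_pos (by omega : s ≤ L - 1)]
    refine ⟨hb0, hbP, fun p hp => ?_⟩
    obtain ⟨hpal, i, j, hj1, hj2, hj3, rfl⟩ := hp
    exact hbU i j hj1 hj2 hj3 (by omega) hpal
  | succ n ihn =>
    by_cases hcase : s ≤ L - 1
    · rw [pvOuterA, if_pos hcase]
      refine ⟨hb0, hbP, fun p hp => ?_⟩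
      obtain ⟨hpal, i, j, hj1, hj2, hj3, rfl⟩ := hp
      exact hbU i j hj1 hj2 hj3 (by omega) hpal
    · rw [pvOuterA, if_neg hcase]
      obtain ⟨in1, in2, in3⟩ := pvInnerA_spec base L s (by omega)
        (s - (L - 1)).toNat s best (Int.self_le_toNat _) hb0
      apply ihn (s - 1) _ (by omega) (by omega) (by omega)
      · rcases in1 with h | ⟨hp, j, hj1, hj2, hj3⟩
        · rw [h]; exact hbP
        · exact Or.inr ⟨hp, s, j, hj1, hj2, hsU, hj3⟩
      · intro i j hj1 hj2 hj3 hsi hpal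
        rcases eq_or_lt_of_le (by omega : s ≤ i) with rfl | hlt
        · exact in3 j hj1 hj2 hpal
        · exact le_trans (hbU i j hj1 hj2 hj3 hlt hpal) in2

-- ---------- digit machinery ----------

lemma pvDigits_step (base n : Int) (h : 0 < n ∧ 2 ≤ base) :
    pvDigitsOf base n = n % base :: pvDigitsOf base (n / base) := by
  rw [pvDigitsOf, dif_pos h, PySem.Int.mod_eq_emod_of_pos (by omega),
    PySem.Int.floordiv_eq_ediv_of_pos (by omega)]

lemma pvDigits_nil (base n : Int) (h : ¬ (0 < n ∧ 2 ≤ base)) :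
    pvDigitsOf base n = [] := by
  rw [pvDigitsOf, dif_neg h]

lemma pvDiv_facts (base n : Int) (h : 0 < n ∧ 2 ≤ base) :
    0 ≤ n % base ∧ n % base < base ∧ base * (n / base) + n % base = n ∧
    0 ≤ n / base ∧ n / base < n := by
  obtain ⟨hn, hb⟩ := h
  have h0 : 0 ≤ n % base := Int.emod_nonneg n (by omega)
  have h1 : n % base < base := Int.emod_lt_of_pos n (by omega)
  have h2 : base * (n / base) + n % base = n := Int.ediv_add_emod n base
  have h3 : 0 ≤ n / base := Int.ediv_nonneg (by omega) (by omega)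
  have h4 : n / base < n := by nlinarith
  exact ⟨h0, h1, h2, h3, h4⟩

def pvVal (base : Int) : List Int → Int
  | [] => 0
  | d :: t => d + base * pvVal base t

lemma pvVal_digits_aux (base : Int) (hb : 2 ≤ base) (k : ℕ) :
    ∀ n : Int, n.toNat ≤ k → 0 ≤ n → pvVal base (pvDigitsOf base n) = n := by
  induction k with
  | zero =>
    intro n h1 h2
    have hn : n = 0 := by omega
    subst hn
    rw [pvDigits_nil base 0 (by omega)]
    rfl
  | succ k ih =>
    intro n h1 h2
    by_cases hn : 0 < n
    · obtain ⟨d0, d1, d2, d3, d4⟩ := pvDiv_facts base n ⟨hn, hb⟩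
      rw [pvDigits_step base n ⟨hn, hb⟩]
      simp only [pvVal]
      rw [ih (n / base) (by omega) d3]
      linarith
    · have hn0 : n = 0 := by omega
      subst hn0
      rw [pvDigits_nil base 0 (by omega)]
      rfl

lemma pvVal_digits (base : Int) (hb : 2 ≤ base) (n : Int) (hn : 0 ≤ n) :
    pvVal base (pvDigitsOf base n) = n :=
  pvVal_digits_aux base hb n.toNat n le_rfl hn

lemma pvDigits_bounds_aux (base : Int) (hb : 2 ≤ base) (k : ℕ) :
    ∀ n : Int, n.toNat ≤ k → ∀ d ∈ pvDigitsOf base n, 0 ≤ d ∧ d < base := by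
  induction k with
  | zero =>
    intro n h1 d hd
    rw [pvDigits_nil base n (by omega)] at hd
    simp at hd
  | succ k ih =>
    intro n h1 d hd
    by_cases hn : 0 < n
    · obtain ⟨d0, d1, d2, d3, d4⟩ := pvDiv_facts base n ⟨hn, hb⟩
      rw [pvDigits_step base n ⟨hn, hb⟩] at hd
      rcases List.mem_cons.mp hd with h | h
      · subst h; exact ⟨d0, d1⟩
      · exact ih (n / base) (by omega) d h
    · rw [pvDigits_nil base n (by omega)] at hd
      simp at hd

lemma pvDigits_bounds (base : Int) (hb : 2 ≤ base) (n : Int) :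
    ∀ d ∈ pvDigitsOf base n, 0 ≤ d ∧ d < base :=
  pvDigits_bounds_aux base hb n.toNat n le_rfl

lemma pvVal_append (base : Int) (l : List Int) (d : Int) :
    pvVal base (l ++ [d]) = pvVal base l + d * base ^ l.length := by
  induction l with
  | nil => simp [pvVal]
  | cons a t ih =>
    simp only [List.cons_append, pvVal, ih, List.length_cons]
    ring

lemma pvRevIn_foldl_aux (base : Int) (k : ℕ) :
    ∀ n acc : Int, n.toNat ≤ k →
      pvRevIn base acc n = (pvDigitsOf base n).foldl (fun a d => a * base + d) acc := by
  induction k with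
  | zero =>
    intro n acc h1
    rw [pvRevIn, pvDigitsOf]
    have hn : ¬ 0 < n := by omega
    rw [dif_neg (by tauto), dif_neg (by tauto)]
    rfl
  | succ k ih =>
    intro n acc h1
    by_cases h : 0 < n ∧ 2 ≤ base
    · obtain ⟨d0, d1, d2, d3, d4⟩ := pvDiv_facts base n h
      rw [pvRevIn, dif_pos h, pvDigits_step base n h]
      simp only [List.foldl_cons]
      rw [PySem.Int.mod_eq_emod_of_pos (by omega),
        PySem.Int.floordiv_eq_ediv_of_pos (by omega)]
      exact ih (n / base) (acc * base + n % base) (by omega)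
    · rw [pvRevIn, dif_neg h, pvDigits_nil base n h]
      rfl

lemma pvRevIn_foldl (base : Int) (acc n : Int) :
    pvRevIn base acc n = (pvDigitsOf base n).foldl (fun a d => a * base + d) acc :=
  pvRevIn_foldl_aux base n.toNat n acc le_rfl

lemma pvFoldl_val (base : Int) (l : List Int) (acc : Int) :
    l.foldl (fun a d => a * base + d) acc = pvVal base l.reverse + acc * base ^ l.length := by
  induction l generalizing acc with
  | nil => simp [pvVal]
  | cons a t ih =>
    simp only [List.foldl_cons, List.reverse_cons, List.length_cons, ih,
      pvVal_append, List.length_reverse]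
    ring

-- pvIsPalA characterised through the digit list, for positive arguments
lemma pvIsPalA_char (base : Int) (hb : 2 ≤ base) (p : Int) (hp : 1 ≤ p) :
    (pvIsPalA p base = true) ↔ pvDigitsOf base p = (pvDigitsOf base p).reverse := by
  have hstep := pvDigits_step base p ⟨by omega, hb⟩
  have hne : pvDigitsOf base p ≠ [] := by rw [hstep]; simp
  rw [pvIsPalA, if_neg (by omega)]
  simp only [if_neg hne]
  exact beq_iff_eq

lemma pvRevIn_val (base : Int) (n : Int) :
    pvRevIn base 0 n = pvVal base (pvDigitsOf base n).reverse := by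
  rw [pvRevIn_foldl, pvFoldl_val]
  ring

-- ---------- B side: values, lengths, uniqueness ----------

lemma pvVal_nonneg (base : Int) (l : List Int) (hbd : ∀ d ∈ l, 0 ≤ d ∧ d < base) :
    0 ≤ pvVal base l := by
  induction l with
  | nil => simp [pvVal]
  | cons a t ih =>
    obtain ⟨ha0, ha1⟩ := hbd a (by simp)
    have h2 : 0 ≤ pvVal base t := ih (fun d hd => hbd d (by simp [hd]))
    have hbpos : 0 < base := by omega
    simp only [pvVal]
    positivity

lemma pvVal_lt (base : Int) (hb : 2 ≤ base) (l : List Int)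
    (hbd : ∀ d ∈ l, 0 ≤ d ∧ d < base) :
    pvVal base l < base ^ l.length := by
  induction l with
  | nil => simp [pvVal]
  | cons a t ih =>
    obtain ⟨ha0, ha1⟩ := hbd a (by simp)
    have h2 : pvVal base t < base ^ t.length := ih (fun d hd => hbd d (by simp [hd]))
    simp only [pvVal, List.length_cons, pow_succ]
    nlinarith

lemma pvVal_pos_of_getLast (base : Int) (hb : 2 ≤ base) (l : List Int)
    (hbd : ∀ d ∈ l, 0 ≤ d ∧ d < base) (hne : l ≠ [])
    (hlast : ∀ x, l.getLast? = some x → 1 ≤ x) :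
    base ^ (l.length - 1) ≤ pvVal base l := by
  induction l with
  | nil => exact absurd rfl hne
  | cons a t ih =>
    obtain ⟨ha0, ha1⟩ := hbd a (by simp)
    rcases t with _ | ⟨c, u⟩
    · have := hlast a (by simp)
      simpa [pvVal] using this
    · have hrec : base ^ ((c :: u).length - 1) ≤ pvVal base (c :: u) := by
        apply ih (fun d hd => hbd d (by simp at hd ⊢; tauto)) (by simp)
        intro x hx
        apply hlast
        rw [List.getLast?_cons_cons]
        exact hx
      have hlen : (a :: c :: u).length - 1 = ((c :: u).length - 1) + 1 := by simp
      rw [hlen, pow_succ]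
      simp only [pvVal] at *
      nlinarith

lemma pvDigits_getLast_pos (base : Int) (hb : 2 ≤ base) :
    ∀ (k : ℕ) (n : Int), n.toNat ≤ k → 0 < n →
      ∀ x, (pvDigitsOf base n).getLast? = some x → 1 ≤ x := by
  intro k
  induction k with
  | zero => intro n h1 h2; omega
  | succ k ih =>
    intro n h1 h2 x hx
    obtain ⟨d0, d1, d2, d3, d4⟩ := pvDiv_facts base n ⟨h2, hb⟩
    rw [pvDigits_step base n ⟨h2, hb⟩] at hx
    by_cases hq : 0 < n / base
    · rw [pvDigits_step base (n / base) ⟨hq, hb⟩] at hx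
      rw [List.getLast?_cons_cons] at hx
      refine ih (n / base) (by omega) hq x ?_
      rw [pvDigits_step base (n / base) ⟨hq, hb⟩]
      exact hx
    · have hq0 : n / base = 0 := by omega
      have hnn : n % base = n := by
        rw [hq0, mul_zero, zero_add] at d2
        exact d2
      rw [pvDigits_nil base (n / base) (by omega)] at hx
      simp at hx
      omega

-- uniqueness: a bounded digit list with nonzero top digit is THE digit list of its value
lemma pvDigits_of_val (base : Int) (hb : 2 ≤ base) :
    ∀ (l : List Int), (∀ d ∈ l, 0 ≤ d ∧ d < base) →
      (∀ x, l.getLast? = some x → 1 ≤ x) →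
      pvDigitsOf base (pvVal base l) = l := by
  intro l
  induction l with
  | nil => intro _ _; exact pvDigits_nil base 0 (by omega)
  | cons a t ih =>
    intro hbd hlast
    obtain ⟨ha0, ha1⟩ := hbd a (by simp)
    have hbdt : ∀ d ∈ t, 0 ≤ d ∧ d < base := fun d hd => hbd d (by simp [hd])
    have htv : 0 ≤ pvVal base t := pvVal_nonneg base t hbdt
    have hn : pvVal base (a :: t) = a + base * pvVal base t := rfl
    by_cases hte : t = []
    · subst hte
      have ha : 1 ≤ a := hlast a (by simp)
      have h1 : pvVal base [a] = a := by simp [pvVal]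
      rw [h1, pvDigits_step base a ⟨by omega, hb⟩,
        Int.emod_eq_of_lt ha0 ha1, Int.ediv_eq_zero_of_lt ha0 ha1,
        pvDigits_nil base 0 (by omega)]
    · have hlastt : ∀ x, t.getLast? = some x → 1 ≤ x := by
        intro x hx
        apply hlast
        rcases t with _ | ⟨c, u⟩
        · simp at hx
        · rw [List.getLast?_cons_cons]
          exact hx
      have htpos : 1 ≤ pvVal base t := by
        have := pvVal_pos_of_getLast base hb t hbdt hte hlastt
        have h1 : (1 : Int) ≤ base ^ (t.length - 1) := one_le_pow₀ (by omega)
        omega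
      have hnpos : 0 < pvVal base (a :: t) := by rw [hn]; nlinarith
      rw [pvDigits_step base _ ⟨hnpos, hb⟩]
      have hmod : pvVal base (a :: t) % base = a := by
        rw [hn, Int.add_mul_emod_self_left, Int.emod_eq_of_lt ha0 ha1]
      have hdiv : pvVal base (a :: t) / base = pvVal base t := by
        rw [hn, Int.add_mul_ediv_left a (pvVal base t) (by omega : base ≠ 0),
          Int.ediv_eq_zero_of_lt ha0 ha1]
        ring
      rw [hmod, hdiv, ih hbdt hlastt]

lemma pvVal_append_gen (base : Int) (l1 l2 : List Int) :
    pvVal base (l1 ++ l2) = pvVal base l1 + base ^ l1.length * pvVal base l2 := by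
  induction l1 with
  | nil => simp [pvVal]
  | cons a t ih =>
    simp only [List.cons_append, pvVal, ih, List.length_cons, pow_succ]
    ring

-- length of the digit list pins the size of n, and conversely
lemma pvDigits_size (base : Int) (hb : 2 ≤ base) :
    ∀ (k : ℕ) (n : Int), n.toNat ≤ k → 0 < n →
      base ^ ((pvDigitsOf base n).length - 1) ≤ n ∧ n < base ^ (pvDigitsOf base n).length := by
  intro k
  induction k with
  | zero => intro n h1 h2; omega
  | succ k ih =>
    intro n h1 h2
    obtain ⟨d0, d1, d2, d3, d4⟩ := pvDiv_facts base n ⟨h2, hb⟩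
    rw [pvDigits_step base n ⟨h2, hb⟩]
    by_cases hq : 0 < n / base
    · obtain ⟨ihl, ihu⟩ := ih (n / base) (by omega) hq
      have hne : pvDigitsOf base (n / base) ≠ [] := by
        rw [pvDigits_step base (n / base) ⟨hq, hb⟩]; simp
      have hlen : 1 ≤ (pvDigitsOf base (n / base)).length := by
        have := List.length_pos_of_ne_nil hne
        omega
      constructor
      · have h5 : (n % base :: pvDigitsOf base (n / base)).length - 1 =
            ((pvDigitsOf base (n / base)).length - 1) + 1 := by
          simp only [List.length_cons]; omega
        rw [h5, pow_succ]
        nlinarith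
      · have h5 : (n % base :: pvDigitsOf base (n / base)).length =
            (pvDigitsOf base (n / base)).length + 1 := by simp
        rw [h5, pow_succ]
        nlinarith
    · have hq0 : n / base = 0 := by omega
      have hnn : n % base = n := by
        rw [hq0, mul_zero, zero_add] at d2
        exact d2
      rw [hq0, pvDigits_nil base 0 (by omega)]
      simp only [List.length_cons, List.length_nil, Nat.add_sub_cancel, pow_zero]
      have hp1 : base ^ (0 + 1) = base := by ring
      omega

lemma pvDigits_len_unique (base : Int) (hb : 2 ≤ base) {n : Int} {j l : ℕ}
    (hj : base ^ (j - 1) ≤ n ∧ n < base ^ j) (hl : base ^ (l - 1) ≤ n ∧ n < base ^ l)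
    (hj1 : 1 ≤ j) (hl1 : 1 ≤ l) : j = l := by
  by_contra hne
  rcases Nat.lt_or_ge j l with h | h
  · have : base ^ j ≤ base ^ (l - 1) := pow_le_pow_right₀ (by omega) (by omega)
    omega
  · have hlj : l < j := by omega
    have : base ^ l ≤ base ^ (j - 1) := pow_le_pow_right₀ (by omega) (by omega)
    omega

-- digits of n / base^m are the digits of n with the low m dropped
lemma pvDigits_ediv_pow (base : Int) (hb : 2 ≤ base) (m : ℕ) :
    ∀ n : Int, 0 ≤ n → pvDigitsOf base (n / base ^ m) = (pvDigitsOf base n).drop m := by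
  induction m with
  | zero => intro n hn; simp
  | succ m ih =>
    intro n hn
    have hstep : pvDigitsOf base (n / base) = (pvDigitsOf base n).drop 1 := by
      by_cases h2 : 0 < n
      · rw [pvDigits_step base n ⟨h2, hb⟩]; simp
      · have hn0 : n = 0 := by omega
        subst hn0
        rw [Int.zero_ediv, pvDigits_nil base 0 (by omega)]
        simp
    have hdd : n / base ^ (m + 1) = n / base / base ^ m := by
      rw [Int.ediv_ediv_of_nonneg (show (0:Int) ≤ base by omega), ← pow_succ']
    rw [hdd, ih (n / base) (Int.ediv_nonneg hn (by omega)), hstep, List.drop_drop]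
    congr 1
    omega

-- ---------- B side: palindrome construction from the high half ----------

-- the candidate the inner loop builds from high half h (Nat exponents)
def pvConstrN (base : Int) (kk mm : ℕ) (h : Int) : Int :=
  h * base ^ mm + pvRevIn base 0 (h / base ^ (kk - 2 * mm))

lemma pvConstr_rev_bounds (base : Int) (hb : 2 ≤ base) (kk mm : ℕ)
    (hkm : kk = 2 * mm ∨ kk = 2 * mm + 1) (h : Int) (h0 : 0 ≤ h)
    (h1 : h < base ^ (kk - mm)) :
    0 ≤ pvRevIn base 0 (h / base ^ (kk - 2 * mm)) ∧
      pvRevIn base 0 (h / base ^ (kk - 2 * mm)) < base ^ mm := by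
  have hg0 : 0 ≤ h / base ^ (kk - 2 * mm) := Int.ediv_nonneg h0 (by positivity)
  have hglt : h / base ^ (kk - 2 * mm) < base ^ mm := by
    have hpow : (0:Int) < base ^ (kk - 2 * mm) := by positivity
    rw [Int.ediv_lt_iff_lt_mul hpow]
    calc h < base ^ (kk - mm) := h1
    _ ≤ base ^ mm * base ^ (kk - 2 * mm) := by
        rw [← pow_add]
        exact pow_le_pow_right₀ (by omega) (by omega)
  set g := h / base ^ (kk - 2 * mm) with hg
  rw [pvRevIn_val]
  have hbd : ∀ d ∈ (pvDigitsOf base g).reverse, 0 ≤ d ∧ d < base :=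
    fun d hd => pvDigits_bounds base hb g d (List.mem_reverse.mp hd)
  refine ⟨pvVal_nonneg base _ hbd, ?_⟩
  have hlt := pvVal_lt base hb _ hbd
  by_cases hgz : 0 < g
  · obtain ⟨hl, hu⟩ := pvDigits_size base hb g.toNat g le_rfl hgz
    have hne : pvDigitsOf base g ≠ [] := by
      rw [pvDigits_step base g ⟨hgz, hb⟩]; simp
    have hlpos := List.length_pos_of_ne_nil hne
    have hlen : (pvDigitsOf base g).length ≤ mm := by
      by_contra hc
      have : base ^ mm ≤ base ^ ((pvDigitsOf base g).length - 1) :=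
        pow_le_pow_right₀ (by omega) (by omega)
      omega
    have hmono : base ^ (pvDigitsOf base g).length ≤ base ^ mm :=
      pow_le_pow_right₀ (by omega) hlen
    rw [List.length_reverse] at hlt
    omega
  · have hg0' : g = 0 := by omega
    rw [hg0', pvDigits_nil base 0 (by omega)]
    simp only [List.reverse_nil, pvVal]
    positivity

lemma pvConstr_pal (base : Int) (hb : 2 ≤ base) (kk mm : ℕ)
    (hkm : kk = 2 * mm ∨ kk = 2 * mm + 1) (hk1 : 1 ≤ kk) (h : Int)
    (hlo : base ^ (kk - mm - 1) ≤ h) (hhi : h < base ^ (kk - mm)) :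
    pvIsPalA (pvConstrN base kk mm h) base = true ∧
      base ^ (kk - 1) ≤ pvConstrN base kk mm h ∧ pvConstrN base kk mm h < base ^ kk := by
  have h1 : 1 ≤ h := le_trans (one_le_pow₀ (by omega)) hlo
  have hdsh : pvDigitsOf base h ≠ [] := by
    rw [pvDigits_step base h ⟨by omega, hb⟩]; simp
  have hlpos := List.length_pos_of_ne_nil hdsh
  have hkm1 : 1 ≤ kk - mm := by omega
  have hlenh : (pvDigitsOf base h).length = kk - mm := by
    obtain ⟨hl, hu⟩ := pvDigits_size base hb h.toNat h le_rfl (by omega)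
    exact pvDigits_len_unique base hb ⟨hl, hu⟩ ⟨hlo, hhi⟩ (by omega) hkm1
  have hdsg : pvDigitsOf base (h / base ^ (kk - 2 * mm)) =
      (pvDigitsOf base h).drop (kk - 2 * mm) := pvDigits_ediv_pow base hb _ h (by omega)
  have hleng : (pvDigitsOf base (h / base ^ (kk - 2 * mm))).length = mm := by
    rw [hdsg, List.length_drop, hlenh]; omega
  set g := h / base ^ (kk - 2 * mm) with hg
  set M := (pvDigitsOf base g).reverse ++ pvDigitsOf base h with hM
  have hbdM : ∀ d ∈ M, 0 ≤ d ∧ d < base := by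
    intro d hd
    rw [hM, List.mem_append] at hd
    rcases hd with hd | hd
    · exact pvDigits_bounds base hb g d (List.mem_reverse.mp hd)
    · exact pvDigits_bounds base hb h d hd
  have hlastM : ∀ x, M.getLast? = some x → 1 ≤ x := by
    intro x hx
    rw [hM, List.getLast?_append_of_ne_nil _ hdsh] at hx
    exact pvDigits_getLast_pos base hb h.toNat h le_rfl (by omega) x hx
  have hvalM : pvVal base M = pvConstrN base kk mm h := by
    rw [hM, pvVal_append_gen, List.length_reverse, hleng, pvConstrN, pvRevIn_val,
      pvVal_digits base hb h (by omega)]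
    ring
  have hMne : M ≠ [] := by
    rw [hM]
    intro hc
    exact hdsh (List.append_eq_nil_iff.mp hc).2
  have hlenM : M.length = kk := by
    rw [hM, List.length_append, List.length_reverse, hleng, hlenh]
    omega
  have hdsP : pvDigitsOf base (pvConstrN base kk mm h) = M := by
    rw [← hvalM]
    exact pvDigits_of_val base hb M hbdM hlastM
  have hplo : base ^ (kk - 1) ≤ pvConstrN base kk mm h := by
    have := pvVal_pos_of_getLast base hb M hbdM hMne hlastM
    rw [hvalM, hlenM] at this
    exact this
  have hppos : 1 ≤ pvConstrN base kk mm h := by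
    have h2 : (1:Int) ≤ base ^ (kk - 1) := one_le_pow₀ (by omega)
    omega
  have hphi : pvConstrN base kk mm h < base ^ kk := by
    have := pvVal_lt base hb M hbdM
    rw [hvalM, hlenM] at this
    exact this
  have hMrev : M.reverse = M := by
    rcases hkm with he | ho
    · have hz : kk - 2 * mm = 0 := by omega
      rw [hM, hg, hz]
      simp [List.reverse_append]
    · have hz : kk - 2 * mm = 1 := by omega
      rw [hM, hg, hz]
      rw [pvDigits_step base h ⟨by omega, hb⟩]
      simp [List.reverse_append, List.append_assoc]
  refine ⟨?_, hplo, hphi⟩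
  rw [pvIsPalA_char base hb _ hppos, hdsP, hMrev]

lemma pvConstr_mono (base : Int) (hb : 2 ≤ base) (kk mm : ℕ)
    (hkm : kk = 2 * mm ∨ kk = 2 * mm + 1) (h1 h2 : Int) (h10 : 0 ≤ h1)
    (hle : h1 ≤ h2) (hlt : h2 < base ^ (kk - mm)) :
    pvConstrN base kk mm h1 ≤ pvConstrN base kk mm h2 := by
  rcases eq_or_lt_of_le hle with rfl | hlt2
  · exact le_rfl
  · obtain ⟨r10, r11⟩ := pvConstr_rev_bounds base hb kk mm hkm h1 h10 (by omega)
    obtain ⟨r20, r21⟩ := pvConstr_rev_bounds base hb kk mm hkm h2 (by omega) hlt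
    have hB : (0:Int) < base ^ mm := by positivity
    unfold pvConstrN
    nlinarith

lemma pvConstr_complete (base : Int) (hb : 2 ≤ base) (kk mm : ℕ)
    (hkm : kk = 2 * mm ∨ kk = 2 * mm + 1) (hk1 : 1 ≤ kk) (p : Int) (hp : 1 ≤ p)
    (hpal : pvIsPalA p base = true) (hsl : base ^ (kk - 1) ≤ p) (hsu : p < base ^ kk) :
    base ^ (kk - mm - 1) ≤ p / base ^ mm ∧ p / base ^ mm < base ^ (kk - mm) ∧
      pvConstrN base kk mm (p / base ^ mm) = p := by
  have hBm : (0:Int) < base ^ mm := by positivity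
  have hdsp : pvDigitsOf base p ≠ [] := by
    rw [pvDigits_step base p ⟨by omega, hb⟩]; simp
  have hlpos := List.length_pos_of_ne_nil hdsp
  have hlenp : (pvDigitsOf base p).length = kk := by
    obtain ⟨hl, hu⟩ := pvDigits_size base hb p.toNat p le_rfl (by omega)
    exact pvDigits_len_unique base hb ⟨hl, hu⟩ ⟨hsl, hsu⟩ (by omega) hk1
  have hub : p / base ^ mm < base ^ (kk - mm) := by
    rw [Int.ediv_lt_iff_lt_mul hBm, ← pow_add]
    have : kk - mm + mm = kk := by omega
    rw [this]
    exact hsu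
  have hlb : base ^ (kk - mm - 1) ≤ p / base ^ mm := by
    rw [Int.le_ediv_iff_mul_le hBm, ← pow_add]
    have : kk - mm - 1 + mm = kk - 1 := by omega
    rw [this]
    exact hsl
  refine ⟨hlb, hub, ?_⟩
  have hgid : p / base ^ mm / base ^ (kk - 2 * mm) = p / base ^ (kk - mm) := by
    rw [Int.ediv_ediv_of_nonneg (le_of_lt hBm), ← pow_add]
    congr 2
    omega
  have hdsg : pvDigitsOf base (p / base ^ (kk - mm)) =
      (pvDigitsOf base p).drop (kk - mm) := pvDigits_ediv_pow base hb _ p (by omega)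
  have hpalL : pvDigitsOf base p = (pvDigitsOf base p).reverse :=
    (pvIsPalA_char base hb p hp).mp hpal
  have hdsrev : ((pvDigitsOf base p).drop (kk - mm)).reverse =
      (pvDigitsOf base p).take mm := by
    rw [List.reverse_drop, ← hpalL, hlenp]
    congr 1
    omega
  have hrev : pvRevIn base 0 (p / base ^ mm / base ^ (kk - 2 * mm)) =
      pvVal base ((pvDigitsOf base p).take mm) := by
    rw [hgid, pvRevIn_val, hdsg, hdsrev]
  have hdsh : pvDigitsOf base (p / base ^ mm) = (pvDigitsOf base p).drop mm :=
    pvDigits_ediv_pow base hb _ p (by omega)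
  have hvdrop : pvVal base ((pvDigitsOf base p).drop mm) = p / base ^ mm := by
    rw [← hdsh]
    exact pvVal_digits base hb _ (Int.ediv_nonneg (by omega) (by positivity))
  have hsplit : pvVal base ((pvDigitsOf base p).take mm) +
      base ^ mm * (p / base ^ mm) = p := by
    have hga := pvVal_append_gen base ((pvDigitsOf base p).take mm)
      ((pvDigitsOf base p).drop mm)
    rw [List.take_append_drop, pvVal_digits base hb p (by omega), hvdrop] at hga
    have hlt : ((pvDigitsOf base p).take mm).length = mm := by
      rw [List.length_take, hlenp]
      omega
    rw [hlt] at hga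
    omega
  rw [pvConstrN, hrev]
  linarith [hsplit]

-- ---------- B side: the divisor scan ----------

lemma pvFactB_iff_aux (L p : Int) (hp : 1 ≤ p) :
    ∀ (n : ℕ) (a : Int), a ≤ n → (pvFactB L p a = true ↔
      ∃ i, 0 < i ∧ i ≤ a ∧ p ≤ i * i ∧ p % i = 0 ∧ L ≤ p / i) := by
  intro n
  induction n with
  | zero =>
    intro a ha
    rw [pvFactB]
    have hg : ¬ (0 < a ∧ p ≤ a * a) := by omega
    rw [dif_neg hg]
    simp only [Bool.false_eq_true, false_iff, not_exists]
    rintro i ⟨hi0, hia, -, -, -⟩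
    omega
  | succ n ih =>
    intro a ha
    by_cases hg : 0 < a ∧ p ≤ a * a
    · rw [pvFactB, dif_pos hg]
      have hconv : (PySem.Int.mod p a == 0 && decide (L ≤ PySem.Int.floordiv p a)) = true ↔
          p % a = 0 ∧ L ≤ p / a := by
        rw [PySem.Int.mod_eq_emod_of_pos (by omega), PySem.Int.floordiv_eq_ediv_of_pos (by omega)]
        simp
      split_ifs with htest
      · simp only [true_iff]
        obtain ⟨hmod, hdl⟩ := hconv.mp htest
        exact ⟨a, hg.1, le_rfl, hg.2, hmod, hdl⟩
      · rw [ih (a - 1) (by omega)]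
        constructor
        · rintro ⟨i, hi0, hia, hii, hmod, hdl⟩
          exact ⟨i, hi0, by omega, hii, hmod, hdl⟩
        · rintro ⟨i, hi0, hia, hii, hmod, hdl⟩
          rcases eq_or_lt_of_le hia with rfl | hlt
          · exact absurd (hconv.mpr ⟨hmod, hdl⟩) htest
          · exact ⟨i, hi0, by omega, hii, hmod, hdl⟩
    · rw [pvFactB, dif_neg hg]
      simp only [Bool.false_eq_true, false_iff, not_exists]
      rintro i ⟨hi0, hia, hii, -, -⟩
      have hia2 : i * i ≤ a * a := by nlinarith
      omega

lemma pvFactB_iff (L U p : Int) (hL : 1 ≤ L) (hU : 1 ≤ U) (hp : 1 ≤ p) :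
    pvFactB L p U = true ↔ ∃ i j, L ≤ j ∧ j ≤ i ∧ i ≤ U ∧ p = i * j := by
  rw [pvFactB_iff_aux L p hp U.toNat U (Int.self_le_toNat _)]
  constructor
  · rintro ⟨i, hi0, hiU, hii, hmod, hdl⟩
    have hpe : i * (p / i) + p % i = p := Int.ediv_add_emod p i
    refine ⟨i, p / i, hdl, ?_, hiU, by omega⟩
    have h2 : p / i ≤ i * i / i := Int.ediv_le_ediv hi0 hii
    rw [Int.mul_ediv_cancel_left i (by omega)] at h2
    exact h2
  · rintro ⟨i, j, hjL, hji, hiU, rfl⟩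
    have hi0 : 0 < i := by omega
    refine ⟨i, hi0, hiU, ?_, Int.mul_emod_right i j, ?_⟩
    · exact mul_le_mul_of_nonneg_left hji (by omega)
    · rw [Int.mul_ediv_cancel_left j (by omega)]
      exact hjL

-- ---------- B side: loop invariants ----------

-- for an admissible palindrome p of digit count k, its high half reconstructs it
lemma pvInnerB_half (base : Int) (hb : 2 ≤ base) (k m : Int) (hm0 : 0 ≤ m)
    (hkm : k = 2 * m ∨ k = 2 * m + 1) (hk1 : 1 ≤ k) (p : Int) (hp1 : 1 ≤ p)
    (hpal : pvIsPalA p base = true)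
    (hp4 : base ^ (k - 1).toNat ≤ p) (hp5 : p < base ^ k.toNat) :
    base ^ (k - m - 1).toNat ≤ p / base ^ m.toNat ∧
      p / base ^ m.toNat < base ^ (k - m).toNat ∧
      pvConstrN base k.toNat m.toNat (p / base ^ m.toNat) = p := by
  have e1 : (k - 1).toNat = k.toNat - 1 := by omega
  have e2 : (k - m).toNat = k.toNat - m.toNat := by omega
  have e3 : (k - m - 1).toNat = k.toNat - m.toNat - 1 := by omega
  have hkm' : k.toNat = 2 * m.toNat ∨ k.toNat = 2 * m.toNat + 1 := by omega
  rw [e1] at hp4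
  rw [e2, e3]
  exact pvConstr_complete base hb k.toNat m.toNat hkm' (by omega) p hp1 hpal hp4 hp5

lemma pvInnerB_spec (base L U : Int) (hb : 2 ≤ base) (hL : 1 ≤ L) (hU : L ≤ U)
    (k m : Int) (hm0 : 0 ≤ m) (hkm : k = 2 * m ∨ k = 2 * m + 1) (hk1 : 1 ≤ k) :
    ∀ (n : ℕ) (h : Int), h - base ^ (k - m - 1).toNat + 1 ≤ n →
      h < base ^ (k - m).toNat →
    0 ≤ pvInnerB base L U (L * L) (U * U) k m (base ^ (k - m - 1).toNat) h ∧
    (pvInnerB base L U (L * L) (U * U) k m (base ^ (k - m - 1).toNat) h = 0 ∨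
      (L * L ≤ pvInnerB base L U (L * L) (U * U) k m (base ^ (k - m - 1).toNat) h ∧
       pvInnerB base L U (L * L) (U * U) k m (base ^ (k - m - 1).toNat) h ≤ U * U ∧
       pvP base L U (pvInnerB base L U (L * L) (U * U) k m (base ^ (k - m - 1).toNat) h) ∧
       base ^ (k - 1).toNat ≤ pvInnerB base L U (L * L) (U * U) k m (base ^ (k - m - 1).toNat) h)) ∧
    ∀ p, L * L ≤ p → p ≤ U * U → pvP base L U p → base ^ (k - 1).toNat ≤ p →
      p < base ^ k.toNat → p / base ^ m.toNat ≤ h →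
      p ≤ pvInnerB base L U (L * L) (U * U) k m (base ^ (k - m - 1).toNat) h := by
  have hkm' : k.toNat = 2 * m.toNat ∨ k.toNat = 2 * m.toNat + 1 := by omega
  have e2 : (k - m).toNat = k.toNat - m.toNat := by omega
  have e3 : (k - m - 1).toNat = k.toNat - m.toNat - 1 := by omega
  intro n
  induction n with
  | zero =>
    intro h hfuel hlt
    have hstop : h < base ^ (k - m - 1).toNat := by omega
    rw [pvInnerB, if_pos hstop]
    refine ⟨le_rfl, Or.inl rfl, ?_⟩
    intro p hp1 hp2 hp3 hp4 hp5 hp6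
    exfalso
    obtain ⟨hhl, -, -⟩ := pvInnerB_half base hb k m hm0 hkm hk1 p (by nlinarith)
      hp3.1 hp4 hp5
    omega
  | succ n ihn =>
    intro h hfuel hlt
    by_cases hstop : h < base ^ (k - m - 1).toNat
    · rw [pvInnerB, if_pos hstop]
      refine ⟨le_rfl, Or.inl rfl, ?_⟩
      intro p hp1 hp2 hp3 hp4 hp5 hp6
      exfalso
      obtain ⟨hhl, -, -⟩ := pvInnerB_half base hb k m hm0 hkm hk1 p (by nlinarith)
        hp3.1 hp4 hp5
      omega
    · have hh1 : 1 ≤ h := le_trans (one_le_pow₀ (by omega)) (not_lt.mp hstop)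
      have hpconv : h * base ^ m.toNat +
          pvRevIn base 0 (PySem.Int.floordiv h (base ^ (k - 2 * m).toNat)) =
          pvConstrN base k.toNat m.toNat h := by
        have e4 : (k - 2 * m).toNat = k.toNat - 2 * m.toNat := by omega
        rw [PySem.Int.floordiv_eq_ediv_of_pos (by positivity), pvConstrN, e4]
      rw [pvInnerB, if_neg hstop, hpconv]
      obtain ⟨hppal, hplo', hphi'⟩ := pvConstr_pal base hb k.toNat m.toNat hkm'
        (by omega) h (by rw [← e3]; omega) (by rw [← e2]; exact hlt)
      have hpk1 : base ^ (k - 1).toNat ≤ pvConstrN base k.toNat m.toNat h := by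
        have : (k - 1).toNat = k.toNat - 1 := by omega
        rw [this]
        exact hplo'
      have hp0pos : 1 ≤ pvConstrN base k.toNat m.toNat h :=
        le_trans (one_le_pow₀ (by omega)) hpk1
      split_ifs with hplo hptest
      · -- p0 < lo: stop, no k-digit palindrome from smaller halves can reach lo
        refine ⟨le_rfl, Or.inl rfl, ?_⟩
        intro p hp1 hp2 hp3 hp4 hp5 hp6
        exfalso
        obtain ⟨hhl, hhu, hcon⟩ := pvInnerB_half base hb k m hm0 hkm hk1 p
          (by nlinarith) hp3.1 hp4 hp5
        have hmono := pvConstr_mono base hb k.toNat m.toNat hkm'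
          (p / base ^ m.toNat) h (Int.ediv_nonneg (by nlinarith) (by positivity))
          hp6 (by rw [← e2]; exact hlt)
        omega
      · -- hit: p0 is within range and factors
        obtain ⟨hphi, hfact⟩ := hptest
        have hpair := (pvFactB_iff L U _ hL (by omega) hp0pos).mp hfact
        refine ⟨by omega, Or.inr ⟨by omega, hphi, ⟨hppal, hpair⟩, hpk1⟩, ?_⟩
        intro p hp1 hp2 hp3 hp4 hp5 hp6
        obtain ⟨hhl, hhu, hcon⟩ := pvInnerB_half base hb k m hm0 hkm hk1 p
          (by nlinarith) hp3.1 hp4 hp5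
        have hmono := pvConstr_mono base hb k.toNat m.toNat hkm'
          (p / base ^ m.toNat) h (Int.ediv_nonneg (by nlinarith) (by positivity))
          hp6 (by rw [← e2]; exact hlt)
        omega
      · -- miss: recurse on h - 1
        obtain ⟨ih0, ih1, ih2⟩ := ihn (h - 1) (by omega) (by omega)
        refine ⟨ih0, ih1, ?_⟩
        intro p hp1 hp2 hp3 hp4 hp5 hp6
        obtain ⟨hhl, hhu, hcon⟩ := pvInnerB_half base hb k m hm0 hkm hk1 p
          (by nlinarith) hp3.1 hp4 hp5
        rcases eq_or_lt_of_le hp6 with heq | hlt2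
        · exfalso
          apply hptest
          rw [heq] at hcon
          rw [hcon]
          exact ⟨hp2, (pvFactB_iff L U p hL (by omega) (by nlinarith)).mpr hp3.2⟩
        · exact ih2 p hp1 hp2 hp3 hp4 hp5 (by omega)

lemma pvOuterB_spec (base L U : Int) (hb : 2 ≤ base) (hL : 1 ≤ L) (hU : L ≤ U) :
    ∀ (n : ℕ) (k : Int), k ≤ n →
    0 ≤ pvOuterB base L U (L * L) (U * U) k ∧
    (pvOuterB base L U (L * L) (U * U) k = 0 ∨
      pvP base L U (pvOuterB base L U (L * L) (U * U) k)) ∧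
    ∀ p, L * L ≤ p → p ≤ U * U → pvP base L U p → p < base ^ k.toNat →
      p ≤ pvOuterB base L U (L * L) (U * U) k := by
  intro n
  induction n with
  | zero =>
    intro k hk
    rw [pvOuterB, if_pos (by omega : k < 1)]
    refine ⟨le_rfl, Or.inl rfl, ?_⟩
    intro p hp1 hp2 hp3 hp4
    have hz : k.toNat = 0 := by omega
    rw [hz, pow_zero] at hp4
    nlinarith
  | succ n ihn =>
    intro k hk
    by_cases hk1 : k < 1
    · rw [pvOuterB, if_pos hk1]
      refine ⟨le_rfl, Or.inl rfl, ?_⟩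
      intro p hp1 hp2 hp3 hp4
      have hz : k.toNat = 0 := by omega
      rw [hz, pow_zero] at hp4
      nlinarith
    · have hm2 : PySem.Int.floordiv k 2 = k / 2 :=
        PySem.Int.floordiv_eq_ediv_of_pos (by omega)
      have hdm := Int.ediv_add_emod k 2
      have hme0 : 0 ≤ k % 2 := Int.emod_nonneg k (by omega)
      have hme1 : k % 2 < 2 := Int.emod_lt_of_pos k (by omega)
      set m := PySem.Int.floordiv k 2 with hmdef
      have hm0 : 0 ≤ m := by omega
      have hkm : k = 2 * m ∨ k = 2 * m + 1 := by omega
      have hBm : (0:Int) < base ^ m.toNat := by positivity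
      have hcap : PySem.Int.floordiv (U * U) (base ^ m.toNat) = U * U / base ^ m.toNat :=
        PySem.Int.floordiv_eq_ediv_of_pos hBm
      have hh0lt : pvOuterH0 base (U * U) k m < base ^ (k - m).toNat := by
        rw [pvOuterH0]
        split_ifs with hcmp
        · omega
        · have : (1:Int) ≤ base ^ (k - m).toNat := one_le_pow₀ (by omega)
          omega
      obtain ⟨i0, i1, i2⟩ := pvInnerB_spec base L U hb hL hU k m hm0 hkm (by omega)
        (pvOuterH0 base (U * U) k m - base ^ (k - m - 1).toNat + 1).toNat
        (pvOuterH0 base (U * U) k m) (Int.self_le_toNat _) hh0lt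
      have hstep : pvOuterStep base L U (L * L) (U * U) k =
          pvInnerB base L U (L * L) (U * U) k m (base ^ (k - m - 1).toNat)
            (pvOuterH0 base (U * U) k m) := by
        rw [pvOuterStep, ← hmdef]
      have hub : ∀ p, L * L ≤ p → p ≤ U * U → pvP base L U p → base ^ (k - 1).toNat ≤ p →
          p < base ^ k.toNat → p ≤ pvOuterStep base L U (L * L) (U * U) k := by
        intro p hp1 hp2 hp3 hp4 hp5
        rw [hstep]
        apply i2 p hp1 hp2 hp3 hp4 hp5
        have hple : p / base ^ m.toNat ≤ U * U / base ^ m.toNat :=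
          Int.ediv_le_ediv hBm hp2
        have hplt : p / base ^ m.toNat < base ^ (k - m).toNat := by
          rw [Int.ediv_lt_iff_lt_mul hBm, ← pow_add]
          have he : (k - m).toNat + m.toNat = k.toNat := by omega
          rw [he]
          exact hp5
        rw [pvOuterH0]
        split_ifs with hcmp
        · omega
        · omega
      rw [pvOuterB, if_neg hk1]
      split_ifs with hr0
    -- fallthrough to k - 1
      · obtain ⟨o0, o1, o2⟩ := ihn (k - 1) (by omega)
        refine ⟨o0, o1, ?_⟩
        intro p hp1 hp2 hp3 hp4
        by_cases hband : base ^ (k - 1).toNat ≤ p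
        · exfalso
          have := hub p hp1 hp2 hp3 hband hp4
          rw [hr0] at this
          nlinarith
        · apply o2 p hp1 hp2 hp3
          have he : (k - 1 - 1).toNat ≤ (k - 1).toNat := by omega
          omega
      · have i1' := i1
        rw [← hstep] at i1'
        have i0' := i0
        rw [← hstep] at i0'
        rcases i1' with h | ⟨j1, j2, j3, j4⟩
        · exact absurd h hr0
        · refine ⟨i0', Or.inr j3, ?_⟩
          intro p hp1 hp2 hp3 hp4
          by_cases hband : base ^ (k - 1).toNat ≤ p
          · exact hub p hp1 hp2 hp3 hband hp4
          · omega

lemma pvNumDigits_len (base : Int) : ∀ (fk : ℕ) (t : Int), t.toNat ≤ fk →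
    pvNumDigits base t = ((pvDigitsOf base t).length : Int) := by
  intro fk
  induction fk with
  | zero =>
    intro t h1
    rw [pvNumDigits, pvDigitsOf]
    have hn : ¬ 0 < t := by omega
    rw [dif_neg (by tauto), dif_neg (by tauto)]
    simp
  | succ fk ih =>
    intro t h1
    by_cases hg : 0 < t ∧ 2 ≤ base
    · obtain ⟨d0, d1, d2, d3, d4⟩ := pvDiv_facts base t hg
      rw [pvNumDigits, dif_pos hg, pvDigits_step base t hg,
        PySem.Int.floordiv_eq_ediv_of_pos (by omega), ih (t / base) (by omega)]
      simp
    · rw [pvNumDigits, dif_neg hg, pvDigits_nil base t hg]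
      simp

-- ===== VERDICT (by name: the statement is the Claim_ definition above) =====
theorem solve_spec : Claim_equal_solve := by
  intro digits base _ hpre
  obtain ⟨hd, hb⟩ := hpre
  unfold Spec_solve solve solve_alt
  rw [if_neg (by omega), if_neg (by omega), if_neg (by omega), if_neg (by omega)]
  set L : Int := 10 ^ (digits - 1).toNat with hLdef
  set U : Int := 10 ^ digits.toNat - 1 with hUdef
  have hL : 1 ≤ L := one_le_pow₀ (by norm_num)
  have hU : L ≤ U := by
    have he : digits.toNat = (digits - 1).toNat + 1 := by omega
    have h10 : (10:Int) ^ digits.toNat = 10 ^ (digits - 1).toNat * 10 := by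
      rw [he, pow_succ]
    omega
  have hhi1 : 1 ≤ U * U := by nlinarith
  have hA : pvGoodUB base L U (pvOuterA base L 0 U) := by
    apply pvOuterA_spec base L U hL (U - (L - 1)).toNat U 0 (Int.self_le_toNat _)
      le_rfl le_rfl
    · left; rfl
    · intro i j _ _ hiU hUi _
      omega
  have hB : pvGoodUB base L U
      (pvOuterB base L U (L * L) (U * U) (pvNumDigits base (U * U))) := by
    have hnd : pvNumDigits base (U * U) = ((pvDigitsOf base (U * U)).length : Int) :=
      pvNumDigits_len base (U * U).toNat (U * U) le_rfl
    have hsz := pvDigits_size base hb (U * U).toNat (U * U) le_rfl (by omega)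
    obtain ⟨o0, o1, o2⟩ := pvOuterB_spec base L U hb hL hU
      (pvNumDigits base (U * U)).toNat (pvNumDigits base (U * U)) (Int.self_le_toNat _)
    refine ⟨o0, o1, fun p hp => ?_⟩
    obtain ⟨hlo, hhi⟩ := pvP_bounds hL hp
    apply o2 p hlo hhi hp
    have he : (pvNumDigits base (U * U)).toNat = (pvDigitsOf base (U * U)).length := by
      omega
    rw [he]
    omega
  exact pvGoodUB_unique hA hB
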